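-- pv_equiv track=rewrite | github.com/yerfor/Real3DPortrait | tasks/os_avatar/dataset_utils/audio2motion_dataset.py | erosion_1d
-- ===== SOURCE A (Python) =====
-- def erosion_1d(arr):
--     result = arr.copy()
--     start_index = None
--     continuous_length = 0
--
--     for i, num in enumerate(arr):
--         if num == 1:
--             if continuous_length == 0:
--                 start_index = i
--             continuous_length += 1
--         else:
--             if continuous_length > 0:
--                 # Replace middle 1s with 0s, keep first and last 1
--                 for j in range(start_index, start_index + continuous_length):
--                     result[j] = 0
--                 result[start_index + continuous_length // 2] = 1
--             continuous_length = 0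
--     if continuous_length > 0:
--         # Replace middle 1s with 0s, keep first and last 1
--         for j in range(start_index, start_index + continuous_length):
--             result[j] = 0
--         # result[start_index + continuous_length // 2] = 1
--     return result
-- ===== SOURCE B (Python) =====
-- def erosion_1d(arr):
--     # Two-phase: collect maximal runs of 1s as (start, length), then zero each
--     # run by slice assignment and restore its middle element.
--     runs = []
--     i, n = 0, len(arr)
--     while i < n:
--         if arr[i] == 1:
--             j = i
--             while j < n and arr[j] == 1:
--                 j += 1
--             runs.append((i, j - i))
--             i = j
--         else:
--             i += 1
--     result = arr.copy()
--     for start, length in runs: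
--         result[start:start + length] = [0] * length
--         result[start + length // 2] = 1
--     return result
-- ===== Notes on version B (the rewrite author's own statement) =====
-- stated objective: alternative
-- what changed: B replaces A's single-pass in-place state machine (start_index/continuous_length counters with an inline rewrite at each run end and a duplicated trailing block) by a two-phase algorithm: first collect all maximal runs of 1s as (start, length) pairs with an edge scan, then rewrite each run uniformly by slice assignment plus a middle restore.
-- intended difference: On arrays whose last element is 1, A zeros out the trailing run of 1s entirely (its middle-restoring line is commented out, leaving leftover loop state handled inconsistently), while B restores the middle element of every run including the trailing one, which is the evident intent of the erosion. — e.g. on erosion_1d([1, 1, 1]): A returns [0, 0, 0], B returns [0, 1, 0]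
import Mathlib
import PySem

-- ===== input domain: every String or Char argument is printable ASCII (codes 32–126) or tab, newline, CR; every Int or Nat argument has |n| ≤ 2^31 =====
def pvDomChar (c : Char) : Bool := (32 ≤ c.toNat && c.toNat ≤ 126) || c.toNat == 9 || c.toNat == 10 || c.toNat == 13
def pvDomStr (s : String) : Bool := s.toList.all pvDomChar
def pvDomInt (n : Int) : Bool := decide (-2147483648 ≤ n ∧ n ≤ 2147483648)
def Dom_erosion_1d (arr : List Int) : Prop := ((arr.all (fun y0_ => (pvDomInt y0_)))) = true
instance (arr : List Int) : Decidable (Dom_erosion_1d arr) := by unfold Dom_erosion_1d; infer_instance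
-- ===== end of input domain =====

-- B collects all maximal runs of 1s first, then rewrites each run uniformly (alternative
-- decomposition, same cost); unlike A it restores the middle of the trailing run (see D_).

-- ===== PORT A =====
-- the for-loop over enumerate(arr), carrying (result, start_index, continuous_length, i)
def aLoop (result : List Int) (start_index : Option Nat) (continuous_length : Nat)
    (i : Nat) (rest : List Int) : List Int × Option Nat × Nat :=
  match rest with
  | [] => (result, start_index, continuous_length)
  | num :: rest =>
    if num = 1 then
      aLoop result (if continuous_length = 0 then some i else start_index)
        (continuous_length + 1) (i + 1) rest
    else
      if 0 < continuous_length then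
        let s := start_index.getD 0
        -- for j in range(start_index, start_index + continuous_length): result[j] = 0
        let r1 := (List.range continuous_length).foldl (fun r j => r.set (s + j) (0 : Int)) result
        aLoop (r1.set (s + continuous_length / 2) 1) start_index 0 (i + 1) rest
      else
        aLoop result start_index 0 (i + 1) rest

def erosion_1d (arr : List Int) : List Int :=
  match aLoop arr none 0 0 arr with
  | (result, start_index, continuous_length) =>
    if 0 < continuous_length then
      let s := start_index.getD 0
      (List.range continuous_length).foldl (fun r j => r.set (s + j) (0 : Int)) result
    else result

-- ===== PORT B =====
-- inner while loop: advance j while j < n and arr[j] == 1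
def scanRun (arr : List Int) (j : Nat) : Nat :=
  if _h : j < arr.length ∧ arr.getD j 0 = 1 then scanRun arr (j + 1) else j
termination_by arr.length - j

theorem scanRun_le (arr : List Int) (j : Nat) : j ≤ scanRun arr j := by
  unfold scanRun
  split
  · have := scanRun_le arr (j + 1); omega
  · exact le_refl j
termination_by arr.length - j

theorem scanRun_gt (arr : List Int) (i : Nat) (h : i < arr.length) (h1 : arr.getD i 0 = 1) :
    i < scanRun arr i := by
  rw [scanRun, dif_pos ⟨h, h1⟩]
  have := scanRun_le arr (i + 1); omega

-- outer while loop collecting the (start, length) run list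
def collectRuns (arr : List Int) (i : Nat) : List (Nat × Nat) :=
  if h : i < arr.length then
    if h1 : arr.getD i 0 = 1 then
      (i, scanRun arr i - i) :: collectRuns arr (scanRun arr i)
    else
      collectRuns arr (i + 1)
  else []
termination_by arr.length - i
decreasing_by
  · have := scanRun_gt arr i h h1; omega
  · omega

def erosion_1d_alt (arr : List Int) : List Int :=
  (collectRuns arr 0).foldl
    (fun result p =>
      -- result[start:start+length] = [0]*length  (exact: here 0 ≤ start ≤ start+length ≤ len)
      let r1 := result.take p.1 ++ List.replicate p.2 (0 : Int) ++ result.drop (p.1 + p.2)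
      -- result[start + length // 2] = 1
      r1.set (p.1 + p.2 / 2) 1)
    arr

-- ===== PRECONDITION & SPEC =====
-- On arrays whose last element is 1, A zeros out the trailing run of 1s entirely
-- (its middle-restoring line is commented out), while B restores the middle
-- element of every run including the trailing one, the evident intent.
def D_erosion_1d (arr : List Int) : Prop := arr.getLast? = some 1
instance (arr : List Int) : Decidable (D_erosion_1d arr) := by unfold D_erosion_1d; infer_instance

def Spec_erosion_1d (arr : List Int) (out : List Int) : Prop :=
  ¬ D_erosion_1d arr → out = erosion_1d_alt arr
instance (arr : List Int) (out : List Int) : Decidable (Spec_erosion_1d arr out) := by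
  unfold Spec_erosion_1d; infer_instance

def pvDiffWitness_erosion_1d : List Int := [1, 1, 1]
def pvDiffWitnessOut_erosion_1d : (List Int) × (List Int) := ([0, 0, 0], [0, 1, 0])

-- ===== CLAIM (what is proved, stated in full; the proofs are below) =====
def Claim_unchanged_erosion_1d : Prop :=
  ∀ (arr : List Int), Dom_erosion_1d arr → Spec_erosion_1d arr (erosion_1d arr)
def Claim_changed_erosion_1d : Prop :=
  Dom_erosion_1d (pvDiffWitness_erosion_1d) ∧ D_erosion_1d (pvDiffWitness_erosion_1d) ∧
  erosion_1d (pvDiffWitness_erosion_1d) = pvDiffWitnessOut_erosion_1d.1 ∧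
  erosion_1d_alt (pvDiffWitness_erosion_1d) = pvDiffWitnessOut_erosion_1d.2 ∧
  pvDiffWitnessOut_erosion_1d.1 ≠ pvDiffWitnessOut_erosion_1d.2
def Claim_exact_erosion_1d : Prop :=
  ∀ (arr : List Int), Dom_erosion_1d arr → D_erosion_1d arr →
    erosion_1d arr ≠ erosion_1d_alt arr

-- ===== LEMMAS AND PROOFS =====

-- A's post-loop finalization, as a function of the loop's final state
def aFinal (st : List Int × Option Nat × Nat) : List Int :=
  if 0 < st.2.2 then
    (List.range st.2.2).foldl (fun r j => r.set (st.2.1.getD 0 + j) (0 : Int)) st.1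
  else st.1

-- the run rewrite: k zeros with a 1 restored in the middle
def mid1 (k : Nat) : List Int := (List.replicate k 0).set (k / 2) 1

-- reference semantics of A: pending-run counter k, trailing run fully zeroed
def goA (k : Nat) : List Int → List Int
  | [] => List.replicate k 0
  | x :: xs => if x = 1 then goA (k + 1) xs else mid1 k ++ x :: goA 0 xs

-- reference semantics of B: trailing run also gets its middle restored
def goB (k : Nat) : List Int → List Int
  | [] => mid1 k
  | x :: xs => if x = 1 then goB (k + 1) xs else mid1 k ++ x :: goB 0 xs

-- number of leading 1s
def ones : List Int → Nat
  | [] => 0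
  | x :: xs => if x = 1 then ones xs + 1 else 0

-- run list of the suffix starting at absolute index i (spec of collectRuns)
def runsS (i : Nat) : List Int → List (Nat × Nat)
  | [] => []
  | x :: xs =>
    if x = 1 then (i, ones xs + 1) :: runsS (i + (ones xs + 1)) (xs.drop (ones xs))
    else runsS (i + 1) xs
termination_by l => l.length
decreasing_by
  · simp only [List.length_cons, List.length_drop]; omega
  · simp

theorem mid1_zero : mid1 0 = [] := rfl

theorem mid1_length (k : Nat) : (mid1 k).length = k := by simp [mid1]

theorem ones_decomp (l : List Int) :
    l = List.replicate (ones l) 1 ++ l.drop (ones l) := by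
  induction l with
  | nil => rfl
  | cons x xs ih =>
    simp only [ones]
    split
    · next hx =>
      subst hx
      rw [List.replicate_succ]
      simpa using ih
    · simp

theorem ones_drop_head (l : List Int) :
    ∀ y, (l.drop (ones l)).head? = some y → y ≠ 1 := by
  induction l with
  | nil => simp [ones]
  | cons x xs ih =>
    simp only [ones]
    split
    · simpa using ih
    · next hx =>
      intro y hy hy1
      simp at hy
      exact hx (by rw [hy, hy1])

theorem set_append_len (P : List Int) (x : Int) (t : List Int) (v : Int) :
    (P ++ x :: t).set P.length v = P ++ v :: t := by
  rw [List.set_append_right _ _ (le_refl _)]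
  simp

theorem getD_append_len (P : List Int) (x : Int) (t : List Int) (d : Int) :
    (P ++ x :: t).getD P.length d = x := by
  rw [List.getD_append_right _ _ _ _ (le_refl _)]
  simp

theorem zero_fold (cl : Nat) : ∀ (P Q rest : List Int), Q.length = cl →
    (List.range cl).foldl (fun r j => r.set (P.length + j) (0 : Int)) (P ++ (Q ++ rest))
      = P ++ (List.replicate cl 0 ++ rest) := by
  induction cl with
  | zero => intro P Q rest hQ; rw [List.eq_nil_of_length_eq_zero hQ]; simp
  | succ c ih =>
    intro P Q rest hQ
    match Q with
    | [] => simp at hQ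
    | q :: Q' =>
      rw [List.range_succ_eq_map]
      simp only [List.foldl_cons, List.foldl_map]
      have h0 : (P ++ (q :: Q' ++ rest)).set (P.length + 0) 0 = (P ++ [0]) ++ (Q' ++ rest) := by
        simpa using set_append_len P q (Q' ++ rest) 0
      rw [h0]
      have hfun : ∀ (r : List Int) (j : Nat),
          r.set (P.length + (j + 1)) (0 : Int) = r.set ((P ++ [0]).length + j) 0 := by
        intro r j; congr 1; simp; omega
      simp only [hfun]
      rw [ih (P ++ [0]) Q' rest (by simpa using hQ)]
      simp [List.replicate_succ]

theorem set_mid (cl : Nat) (hcl : 0 < cl) (P rest : List Int) :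
    (P ++ (List.replicate cl (0 : Int) ++ rest)).set (P.length + cl / 2) 1
      = P ++ (mid1 cl ++ rest) := by
  rw [List.set_append_right _ _ (by omega)]
  rw [Nat.add_sub_cancel_left]
  rw [List.set_append_left _ _ (by simp [Nat.div_lt_self hcl])]
  rfl

theorem aLoop_spec : ∀ (rest P : List Int) (cl : Nat) (si : Option Nat),
    (0 < cl → si = some P.length) →
    aFinal (aLoop (P ++ (List.replicate cl 1 ++ rest)) si cl (P.length + cl) rest)
      = P ++ goA cl rest := by
  intro rest
  induction rest with
  | nil =>
    intro P cl si hsi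
    simp only [aLoop, goA, aFinal]
    by_cases hcl : 0 < cl
    · rw [if_pos hcl, hsi hcl]
      simpa using zero_fold cl P (List.replicate cl 1) [] (by simp)
    · have : cl = 0 := by omega
      subst this
      simp
  | cons x rest' ih =>
    intro P cl si hsi
    simp only [aLoop]
    by_cases hx : x = 1
    · rw [if_pos hx]
      subst hx
      have harr : P ++ (List.replicate cl 1 ++ 1 :: rest')
          = P ++ (List.replicate (cl + 1) 1 ++ rest') := by
        simp [List.replicate_succ', List.append_assoc]
      have hi : P.length + cl + 1 = P.length + (cl + 1) := by omega
      rw [harr, hi]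
      have hsi' : 0 < cl + 1 →
          (if cl = 0 then some (P.length + cl) else si) = some P.length := by
        intro _
        by_cases hc : cl = 0
        · subst hc; simp
        · rw [if_neg hc]; exact hsi (by omega)
      rw [ih P (cl + 1) _ hsi']
      simp [goA]
    · rw [if_neg hx]
      by_cases hcl : 0 < cl
      · rw [if_pos hcl, hsi hcl]
        simp only [Option.getD_some]
        rw [zero_fold cl P (List.replicate cl 1) (x :: rest') (by simp)]
        rw [set_mid cl hcl P (x :: rest')]
        have harr : P ++ (mid1 cl ++ x :: rest')
            = (P ++ mid1 cl ++ [x]) ++ (List.replicate 0 1 ++ rest') := by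
          simp [List.append_assoc]
        have hi : P.length + cl + 1 = (P ++ mid1 cl ++ [x]).length + 0 := by
          simp only [List.length_append, mid1_length, List.length_cons, List.length_nil]
        rw [harr, hi, ih (P ++ mid1 cl ++ [x]) 0 (some P.length) (by omega)]
        simp [goA, hx, List.append_assoc]
      · have hc0 : cl = 0 := by omega
        subst hc0
        have harr : P ++ (List.replicate 0 1 ++ x :: rest')
            = (P ++ [x]) ++ (List.replicate 0 1 ++ rest') := by simp
        have hi : P.length + 0 + 1 = (P ++ [x]).length + 0 := by simp
        rw [if_neg (by omega : ¬ (0:Nat) < 0), harr, hi, ih (P ++ [x]) 0 si (by omega)]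
        simp [goA, hx, mid1_zero]

theorem A_eq_goA (arr : List Int) : erosion_1d arr = goA 0 arr := by
  have h := aLoop_spec arr [] 0 none (by omega)
  have he : erosion_1d arr = aFinal (aLoop arr none 0 0 arr) := rfl
  simp only [List.nil_append, List.replicate_zero, List.length_nil, Nat.zero_add] at h
  rw [he, h]

theorem scanRun_spec : ∀ (rest P : List Int),
    scanRun (P ++ rest) P.length = P.length + ones rest := by
  intro rest
  induction rest with
  | nil =>
    intro P
    rw [scanRun, dif_neg (by simp)]
    simp [ones]
  | cons x xs ih =>
    intro P
    rw [scanRun]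
    by_cases hx : x = 1
    · rw [dif_pos ⟨by simp, by rw [getD_append_len]; exact hx⟩]
      have harr : P ++ x :: xs = (P ++ [x]) ++ xs := by simp
      have hi : P.length + 1 = (P ++ [x]).length := by simp
      rw [harr, hi, ih (P ++ [x])]
      simp [ones, hx]
      omega
    · rw [dif_neg (by rw [getD_append_len]; simp [hx])]
      simp [ones, hx]

theorem collect_eq : ∀ (n : Nat) (rest P : List Int), rest.length ≤ n →
    collectRuns (P ++ rest) P.length = runsS P.length rest := by
  intro n
  induction n with
  | zero =>
    intro rest P hlen
    have : rest = [] := List.eq_nil_of_length_eq_zero (by omega)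
    subst this
    rw [collectRuns, dif_neg (by simp)]
    simp [runsS]
  | succ n ih =>
    intro rest P hlen
    match rest with
    | [] =>
      rw [collectRuns, dif_neg (by simp)]
      simp [runsS]
    | x :: xs =>
      rw [collectRuns]
      by_cases hx : x = 1
      · rw [dif_pos (by simp), dif_pos (by rw [getD_append_len]; exact hx)]
        have hscan : scanRun (P ++ x :: xs) P.length = P.length + (ones xs + 1) := by
          rw [scanRun_spec]
          simp [ones, hx]
        have hdec : x :: xs = List.replicate (ones xs + 1) 1 ++ xs.drop (ones xs) := by
          have h := ones_decomp (x :: xs)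
          simp only [ones, if_pos hx] at h
          simpa using h
        have harr : P ++ x :: xs = (P ++ List.replicate (ones xs + 1) 1) ++ xs.drop (ones xs) := by
          rw [List.append_assoc, ← hdec]
        have hP' : P.length + (ones xs + 1) = (P ++ List.replicate (ones xs + 1) 1).length := by
          simp
        have hrec : collectRuns (P ++ x :: xs) (scanRun (P ++ x :: xs) P.length)
            = runsS (P.length + (ones xs + 1)) (xs.drop (ones xs)) := by
          rw [hscan]
          conv_lhs => rw [harr, hP']
          rw [ih (xs.drop (ones xs)) _ (by
            have : (xs.drop (ones xs)).length = xs.length - ones xs := List.length_drop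
            simp at hlen ⊢; omega)]
          rw [← hP']
        rw [hrec, hscan]
        simp only [runsS, if_pos hx]
        congr 1
        simp
      · rw [dif_pos (by simp), dif_neg (by rw [getD_append_len]; simp [hx])]
        have harr : P ++ x :: xs = (P ++ [x]) ++ xs := by simp
        have hi : P.length + 1 = (P ++ [x]).length := by simp
        rw [harr, hi, ih xs (P ++ [x]) (by simp at hlen ⊢; omega)]
        simp only [runsS, if_neg hx]
        congr 1
        simp

theorem goB_ones : ∀ (m : Nat) (t : List Int) (k : Nat),
    goB k (List.replicate m 1 ++ t) = goB (k + m) t := by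
  intro m
  induction m with
  | zero => intro t k; simp
  | succ m ih =>
    intro t k
    rw [List.replicate_succ, List.cons_append]
    have h1 : goB k (1 :: (List.replicate m 1 ++ t)) = goB (k + 1) (List.replicate m 1 ++ t) := by
      simp [goB]
    rw [h1, ih t (k + 1), show k + 1 + m = k + (m + 1) by omega]

theorem goB_break : ∀ (t : List Int) (k : Nat),
    (∀ y, t.head? = some y → y ≠ 1) → goB k t = mid1 k ++ goB 0 t := by
  intro t k hh
  match t with
  | [] => simp [goB, mid1_zero]
  | y :: ys =>
    have hy : y ≠ 1 := hh y rfl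
    simp [goB, hy, mid1_zero]

theorem fold_runsS : ∀ (n : Nat) (rest P : List Int), rest.length ≤ n →
    (runsS P.length rest).foldl
      (fun result p =>
        (result.take p.1 ++ List.replicate p.2 (0 : Int) ++ result.drop (p.1 + p.2)).set
          (p.1 + p.2 / 2) 1)
      (P ++ rest) = P ++ goB 0 rest := by
  intro n
  induction n with
  | zero =>
    intro rest P hlen
    have : rest = [] := List.eq_nil_of_length_eq_zero (by omega)
    subst this
    simp [runsS, goB, mid1_zero]
  | succ n ih =>
    intro rest P hlen
    match rest with
    | [] => simp [runsS, goB, mid1_zero]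
    | x :: xs =>
      by_cases hx : x = 1
      · simp only [runsS, if_pos hx, List.foldl_cons]
        have hdec : x :: xs = List.replicate (ones xs + 1) 1 ++ xs.drop (ones xs) := by
          have h := ones_decomp (x :: xs)
          simp only [ones, if_pos hx] at h
          simpa using h
        set k := ones xs + 1 with hk
        set t := xs.drop (ones xs) with ht
        have hstep : ((P ++ x :: xs).take P.length ++ List.replicate k (0 : Int) ++
              (P ++ x :: xs).drop (P.length + k)).set (P.length + k / 2) 1
            = (P ++ mid1 k) ++ t := by
          have htake : (P ++ x :: xs).take P.length = P := by
            rw [List.take_left']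
            rfl
          have hdrop : (P ++ x :: xs).drop (P.length + k) = t := by
            conv_lhs => rw [hdec, ← List.append_assoc]
            rw [List.drop_left' (by simp)]
          rw [htake, hdrop, List.append_assoc]
          rw [set_mid k (by omega) P t]
          rw [List.append_assoc]
        rw [hstep]
        have hlen' : (P ++ mid1 k).length = P.length + k := by simp [mid1_length]
        have hrec := ih t (P ++ mid1 k) (by
          have h1 : t.length = xs.length - ones xs := by rw [ht]; exact List.length_drop
          simp only [List.length_cons] at hlen
          omega)
        rw [hlen'] at hrec
        rw [hrec]
        have hgoB : goB 0 (x :: xs) = mid1 k ++ goB 0 t := by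
          conv_lhs => rw [hdec]
          rw [goB_ones k t 0]
          simp only [Nat.zero_add]
          rw [goB_break t k (by rw [ht]; exact ones_drop_head xs)]
        rw [hgoB, List.append_assoc]
      · simp only [runsS, if_neg hx]
        have harr : P ++ x :: xs = (P ++ [x]) ++ xs := by simp
        have hi : P.length + 1 = (P ++ [x]).length := by simp
        rw [harr, hi, ih xs (P ++ [x]) (by simp at hlen ⊢; omega)]
        simp [goB, hx, mid1_zero, List.append_assoc]

theorem B_eq_goB (arr : List Int) : erosion_1d_alt arr = goB 0 arr := by
  have hc := collect_eq arr.length arr [] (le_refl _)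
  have hf := fold_runsS arr.length arr [] (le_refl _)
  simp only [List.nil_append, List.length_nil] at hc hf
  simp only [erosion_1d_alt, hc]
  exact hf

theorem repl_ne_mid1 (k : Nat) (hk : 0 < k) : List.replicate k (0 : Int) ≠ mid1 k := by
  intro h
  have := congrArg (fun t => t[k / 2]?) h
  simp [mid1, List.getElem?_set, Nat.div_lt_self hk, List.getElem?_replicate] at this

theorem goAB_eq : ∀ (l : List Int) (k : Nat),
    l.getLast? ≠ some 1 → (l = [] → k = 0) → goA k l = goB k l := by
  intro l
  induction l with
  | nil =>
    intro k _ h0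
    rw [h0 rfl]
    rfl
  | cons x xs ih =>
    intro k hlast _
    match xs with
    | [] =>
      have hx : x ≠ 1 := by simpa using hlast
      simp [goA, goB, hx, mid1_zero]
    | y :: ys =>
      have hlast' : (y :: ys).getLast? ≠ some 1 := by
        rwa [List.getLast?_cons_cons] at hlast
      have hred : goA k (x :: y :: ys) = if x = 1 then goA (k + 1) (y :: ys)
          else mid1 k ++ x :: goA 0 (y :: ys) := rfl
      have hred' : goB k (x :: y :: ys) = if x = 1 then goB (k + 1) (y :: ys)
          else mid1 k ++ x :: goB 0 (y :: ys) := rfl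
      rw [hred, hred']
      by_cases hx : x = 1
      · rw [if_pos hx, if_pos hx]
        exact ih (k + 1) hlast' (by simp)
      · rw [if_neg hx, if_neg hx, ih 0 hlast' (by simp)]

theorem goAB_ne : ∀ (l : List Int) (k : Nat),
    (l.getLast? = some 1 ∨ (l = [] ∧ 0 < k)) → goA k l ≠ goB k l := by
  intro l
  induction l with
  | nil =>
    intro k h
    have hk : 0 < k := by
      rcases h with h | h
      · simp at h
      · exact h.2
    simpa [goA, goB] using repl_ne_mid1 k hk
  | cons x xs ih =>
    intro k h
    have hlast : (x :: xs).getLast? = some 1 := by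
      rcases h with h | h
      · exact h
      · simp at h
    match xs with
    | [] =>
      have hx : x = 1 := by simpa using hlast
      have hred : goA k [x] = goA (k + 1) [] := by subst hx; rfl
      have hred' : goB k [x] = goB (k + 1) [] := by subst hx; rfl
      rw [hred, hred']
      exact ih (k + 1) (Or.inr ⟨rfl, by omega⟩)
    | y :: ys =>
      have hlast' : (y :: ys).getLast? = some 1 := by
        rwa [List.getLast?_cons_cons] at hlast
      have hred : goA k (x :: y :: ys) = if x = 1 then goA (k + 1) (y :: ys)
          else mid1 k ++ x :: goA 0 (y :: ys) := rfl
      have hred' : goB k (x :: y :: ys) = if x = 1 then goB (k + 1) (y :: ys)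
          else mid1 k ++ x :: goB 0 (y :: ys) := rfl
      rw [hred, hred']
      by_cases hx : x = 1
      · rw [if_pos hx, if_pos hx]
        exact ih (k + 1) (Or.inl hlast')
      · rw [if_neg hx, if_neg hx]
        intro heq
        have h2 := List.append_cancel_left heq
        injection h2 with _ h3
        exact ih 0 (Or.inl hlast') h3

-- ===== VERDICT (by name: the statement is the Claim_ definition above) =====
theorem erosion_1d_spec : Claim_unchanged_erosion_1d := by
  intro arr _ hD
  rw [A_eq_goA, B_eq_goB]
  exact goAB_eq arr 0 hD (fun _ => rfl)

theorem erosion_1d_changed : Claim_changed_erosion_1d := by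
  unfold Claim_changed_erosion_1d
  refine ⟨by decide, by decide, by decide, ?_, by decide⟩
  rw [show erosion_1d_alt pvDiffWitness_erosion_1d = goB 0 pvDiffWitness_erosion_1d from
    B_eq_goB _]
  decide

theorem erosion_1d_tight : Claim_exact_erosion_1d := by
  intro arr _ hD
  rw [A_eq_goA, B_eq_goB]
  exact goAB_ne arr 0 (Or.inl hD)
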